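-- pv_equiv track=rewrite | github.com/Smartappli/AIMER | AIMER-ROOT/RAG/main.py | extract_tables_with_content
-- ===== SOURCE A (Python) =====
-- def extract_context_and_table(lines: list[str], table_index: int) -> tuple[str, int]:
--     """
--     Extract markdown table plus nearby context lines.
--
--     Returns:
--         Tuple of extracted content and the next line index to process.
--
--     """
--     table_lines: list[str] = []
--     i = table_index
--
--     while (i < len(lines)) and (lines[i].startswith("|")):
--         table_lines.append(lines[i])
--         i += 1
--
--     start = max(0, table_index - 2)
--     context_lines = lines[start:table_index]
--
--     content = "\n".join(context_lines) + "\n\n" + "\n".join(table_lines)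
--
--     return content, i
--
-- def extract_tables_with_content(markdown_text: str) -> list[tuple[str, str, int]]:
--     """
--     Parse markdown and return detected tables with context.
--
--     Returns:
--         List of tuples ``(table_content, table_name, page_number)``.
--
--     """
--     lines = markdown_text.split("\n")
--     lines = [line for line in lines if line.strip()]
--     tables: list[tuple[str, str, int]] = []
--     current_page = 1
--     table_num = 1
--     i = 0
--
--     while i < len(lines):
--         if "<!-- page break -->" in lines[i]:
--             current_page += 1
--             i += 1
--             continue
--
--         if lines[i].startswith("|") and lines[i].count("|") > 1:
--             content, next_i = extract_context_and_table(lines, i)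
--             tables.append((content, f"table_{table_num}", current_page))
--             table_num += 1
--             i = next_i
--         else:
--             i += 1
--
--     return tables
-- ===== SOURCE B (Python) =====
-- def extract_tables_with_content(markdown_text: str) -> list[tuple[str, str, int]]:
--     """Single state-machine pass over the non-blank lines with a 2-line context buffer."""
--     tables: list[tuple[str, str, int]] = []
--     page = 1
--     num = 1
--     in_table = False
--     table_lines: list[str] = []
--     context: list[str] = []
--     buf: list[str] = []  # last two processed lines
--
--     def flush() -> None:
--         nonlocal num, in_table
--         tables.append(("\n".join(context) + "\n\n" + "\n".join(table_lines),
--                        f"table_{num}", page))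
--         num += 1
--         in_table = False
--
--     for line in markdown_text.split("\n"):
--         if not line.strip():
--             continue
--         if in_table:
--             if line.startswith("|"):
--                 table_lines.append(line)
--             else:
--                 flush()
--                 if "<!-- page break -->" in line:
--                     page += 1
--         else:
--             if "<!-- page break -->" in line:
--                 page += 1
--             elif line.startswith("|") and line.count("|") > 1:
--                 in_table = True
--                 table_lines = [line]
--                 context = buf[:]
--         buf = (buf + [line])[-2:]
--     if in_table:
--         flush()
--     return tables
-- ===== Notes on version B (the rewrite author's own statement) =====
-- stated objective: simpler
-- what changed: Replaced A's index-based scan with a helper that re-walks the table run and a slice for context by one flat state-machine pass over the lines with an in_table flag, an accumulating table buffer and a 2-line sliding context buffer.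
import Mathlib
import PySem

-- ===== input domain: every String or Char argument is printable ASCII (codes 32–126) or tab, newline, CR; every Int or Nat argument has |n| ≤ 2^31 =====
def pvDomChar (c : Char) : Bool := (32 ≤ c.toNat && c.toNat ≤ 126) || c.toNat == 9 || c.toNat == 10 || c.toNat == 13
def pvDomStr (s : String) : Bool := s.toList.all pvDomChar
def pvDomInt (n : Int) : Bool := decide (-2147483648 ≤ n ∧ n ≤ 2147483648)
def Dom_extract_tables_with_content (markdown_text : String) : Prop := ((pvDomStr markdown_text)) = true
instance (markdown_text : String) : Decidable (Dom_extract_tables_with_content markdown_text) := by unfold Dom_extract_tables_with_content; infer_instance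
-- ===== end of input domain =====

-- B replaces A's index-jumping scan (helper function, slice for context) by a single
-- state-machine pass with an in_table flag and a 2-line context buffer; objective: simpler.

-- ===== PORT A =====
-- inner while loop of extract_context_and_table
def ectInner (lines : List String) (i : Nat) (tl : List String) : List String × Nat :=
  if _h : i < lines.length ∧ PySem.Str.startswith (lines.getD i "") "|" = true then
    ectInner lines (i + 1) (tl ++ [lines.getD i ""])
  else (tl, i)
termination_by lines.length - i
decreasing_by exact Nat.sub_succ_lt_self _ _ _h.1

-- needed by ectMain's decreasing_by: the inner while never moves the index backwards
theorem ectInner_ge (lines : List String) (i : Nat) (tl : List String) :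
    i ≤ (ectInner lines i tl).2 := by
  unfold ectInner
  split
  · exact Nat.le_trans (Nat.le_succ i) (ectInner_ge lines (i + 1) (tl ++ [lines.getD i ""]))
  · exact Nat.le_refl i
termination_by lines.length - i
decreasing_by exact Nat.sub_succ_lt_self _ _ (And.left ‹_ ∧ _›)

theorem ectInner_gt (lines : List String) (i : Nat) (tl : List String)
    (h : i < lines.length) (hsw : PySem.Str.startswith (lines.getD i "") "|" = true) :
    i < (ectInner lines i tl).2 := by
  rw [ectInner, dif_pos ⟨h, hsw⟩]
  exact Nat.lt_of_lt_of_le (Nat.lt_succ_self i) (ectInner_ge lines (i + 1) (tl ++ [lines.getD i ""]))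

theorem ectMain_dec (lines : List String) (i : Nat)
    (h : i < lines.length)
    (hs : (PySem.Str.startswith (lines.getD i "") "|" &&
           decide (1 < PySem.Str.count (lines.getD i "") "|")) = true) :
    lines.length - (ectInner lines i []).2 < lines.length - i :=
  Nat.sub_lt_sub_left h (ectInner_gt lines i [] h (by
    rw [Bool.and_eq_true] at hs
    exact hs.1))

def extract_context_and_table (lines : List String) (table_index : Nat) : String × Nat :=
  let r := ectInner lines table_index []
  let start : Int := max 0 ((table_index : Int) - 2)
  let context_lines := PySem.List.slice lines (some start) (some (table_index : Int))
  (PySem.Str.join "\n" context_lines ++ "\n\n" ++ PySem.Str.join "\n" r.1, r.2)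

def ectMain (lines : List String) (tables : List (String × String × Int))
    (current_page table_num : Int) (i : Nat) : List (String × String × Int) :=
  if h : i < lines.length then
    if PySem.Str.isIn "<!-- page break -->" (lines.getD i "") then
      ectMain lines tables (current_page + 1) table_num (i + 1)
    else if hs : (PySem.Str.startswith (lines.getD i "") "|" &&
                  decide (1 < PySem.Str.count (lines.getD i "") "|")) = true then
      ectMain lines
        (tables ++ [((extract_context_and_table lines i).1,
                     "table_" ++ PySem.Int.toStr table_num, current_page)])
        current_page (table_num + 1) (extract_context_and_table lines i).2
    else ectMain lines tables current_page table_num (i + 1)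
  else tables
termination_by lines.length - i
decreasing_by
  · exact Nat.sub_succ_lt_self _ _ h
  · exact ectMain_dec lines i h hs
  · exact Nat.sub_succ_lt_self _ _ h

def extract_tables_with_content (markdown_text : String) : List (String × String × Int) :=
  let lines := (PySem.Str.split? markdown_text "\n").getD []
  let lines := lines.filter (fun line => !(PySem.Str.strip line == ""))
  ectMain lines [] 1 1 0

-- ===== PORT B =====
structure BState where
  tables : List (String × String × Int)
  page : Int
  num : Int
  inTable : Bool
  tableLines : List String
  context : List String
  buf : List String

def bFlush (st : BState) : BState :=
  { st with
    tables := st.tables ++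
      [(PySem.Str.join "\n" st.context ++ "\n\n" ++ PySem.Str.join "\n" st.tableLines,
        "table_" ++ PySem.Int.toStr st.num, st.page)],
    num := st.num + 1,
    inTable := false }

def bStep (st : BState) (line : String) : BState :=
  if PySem.Str.strip line == "" then st
  else
    let st' :=
      if st.inTable then
        if PySem.Str.startswith line "|" then { st with tableLines := st.tableLines ++ [line] }
        else
          let f := bFlush st
          if PySem.Str.isIn "<!-- page break -->" line then { f with page := f.page + 1 } else f
      else
        if PySem.Str.isIn "<!-- page break -->" line then { st with page := st.page + 1 }
        else if PySem.Str.startswith line "|" && decide (1 < PySem.Str.count line "|") then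
          { st with inTable := true, tableLines := [line], context := st.buf }
        else st
    { st' with buf := PySem.List.slice (st'.buf ++ [line]) (some (-2)) none }

def extract_tables_with_content_alt (markdown_text : String) : List (String × String × Int) :=
  let fin := ((PySem.Str.split? markdown_text "\n").getD []).foldl bStep ⟨[], 1, 1, false, [], [], []⟩
  (if fin.inTable then bFlush fin else fin).tables

-- ===== PRECONDITION & SPEC =====
def Spec_extract_tables_with_content (markdown_text : String) (out : List (String × String × Int)) : Prop := out = extract_tables_with_content_alt markdown_text
instance (markdown_text : String) (out : List (String × String × Int)) : Decidable (Spec_extract_tables_with_content markdown_text out) := by unfold Spec_extract_tables_with_content; infer_instance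

-- ===== CLAIM (what is proved, stated in full; the proofs are below) =====
def Claim_equal_extract_tables_with_content : Prop := ∀ (markdown_text : String), Dom_extract_tables_with_content markdown_text → Spec_extract_tables_with_content markdown_text (extract_tables_with_content markdown_text)

-- ===== LEMMAS AND PROOFS =====

-- the last two elements of a list (what Python's buf[-2:] invariantly holds)
def last2 {α : Type} (xs : List α) : List α := xs.drop (xs.length - 2)

-- named form of the '|'-prefix test, to keep takeWhile/dropWhile statements stable under simp
def swP (l : String) : Bool := PySem.Str.startswith l "|"

theorem slice_neg_two (xs : List String) :
    PySem.List.slice xs (some (-2)) none = last2 xs := by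
  rw [PySem.List.slice_from_neg_ofNat xs 2 (by omega)]
  rfl

theorem last2_snoc {α : Type} (pre : List α) (x : α) :
    last2 (last2 pre ++ [x]) = last2 (pre ++ [x]) := by
  simp only [last2, List.drop_append, List.drop_drop, List.length_append, List.length_drop,
    List.length_cons, List.length_nil]
  congr 1
  · congr 1
    omega
  · congr 1
    omega

-- blank lines are skipped by bStep
theorem bStep_blank (st : BState) (x : String) (h : (PySem.Str.strip x == "") = true) :
    bStep st x = st := by
  have h' := h
  simp at h'
  simp [bStep, h']

theorem foldl_bStep_filter (l : List String) (st : BState) :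
    l.foldl bStep st = (l.filter (fun x => !(PySem.Str.strip x == ""))).foldl bStep st := by
  induction l generalizing st with
  | nil => rfl
  | cons x t ih =>
    by_cases h : (PySem.Str.strip x == "") = true
    · have h' := h
      simp at h'
      simp [h', bStep_blank st x h, ih]
    · rw [Bool.not_eq_true] at h
      have h' := h
      simp at h'
      simp [h', ih]

-- what A's inner while computes: the leading run of '|' lines and the index past it
theorem ectInner_spec (rest : List String) : ∀ (lines : List String) (i : Nat) (tl : List String),
    lines.drop i = rest →
    ectInner lines i tl = (tl ++ rest.takeWhile swP, i + (rest.takeWhile swP).length) := by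
  induction rest with
  | nil =>
    intro lines i tl hd
    have hlen := List.drop_eq_nil_iff.mp hd
    rw [ectInner, dif_neg (by rintro ⟨h1, _⟩; omega)]
    simp
  | cons l rest' ih =>
    intro lines i tl hd
    have hlt : i < lines.length := by
      by_contra hc
      rw [Nat.not_lt] at hc
      rw [List.drop_eq_nil_iff.mpr hc] at hd
      simp at hd
    have hget? : lines[i]? = some l := by
      have h0 : (lines.drop i)[0]? = some l := by rw [hd]; rfl
      rw [List.getElem?_drop] at h0
      simpa using h0
    have hgd : lines.getD i "" = l := by
      simp [List.getD_eq_getElem?_getD, hget?]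
    have hd' : lines.drop (i + 1) = rest' := by
      have h1 : List.drop 1 (lines.drop i) = rest' := by rw [hd]; rfl
      rwa [List.drop_drop] at h1
    by_cases hsw : swP l = true
    · rw [ectInner, dif_pos ⟨hlt, by rw [hgd]; exact hsw⟩, hgd,
        ih lines (i + 1) (tl ++ [l]) hd']
      rw [List.takeWhile_cons, if_pos hsw, Prod.mk.injEq]
      constructor
      · simp
      · simp only [List.length_cons]
        omega
    · rw [ectInner, dif_neg (by rintro ⟨_, hh⟩; rw [hgd] at hh; exact hsw hh)]
      rw [List.takeWhile_cons, if_neg hsw]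
      simp

-- folding B over a run of nonblank '|' lines while inside a table
theorem fold_run (run : List String) :
    ∀ (rest : List String) (tables : List (String × String × Int)) (page num : Int)
      (tl ctx pre : List String),
    (∀ x ∈ run, swP x = true ∧ (PySem.Str.strip x == "") = false) →
    (run ++ rest).foldl bStep ⟨tables, page, num, true, tl, ctx, last2 pre⟩
      = rest.foldl bStep ⟨tables, page, num, true, tl ++ run, ctx, last2 (pre ++ run)⟩ := by
  induction run with
  | nil => intro rest tables page num tl ctx pre _; simp
  | cons x run' ih =>
    intro rest tables page num tl ctx pre hx
    have h1 : PySem.Str.startswith x "|" = true := (hx x (by simp)).1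
    have h2 := (hx x (by simp)).2
    have hstep : bStep ⟨tables, page, num, true, tl, ctx, last2 pre⟩ x
        = ⟨tables, page, num, true, tl ++ [x], ctx, last2 (pre ++ [x])⟩ := by
      have h1' := h1
      have h2' := h2
      simp at h1' h2'
      simp [bStep, h1', h2', slice_neg_two, last2_snoc]
    calc ((x :: run') ++ rest).foldl bStep ⟨tables, page, num, true, tl, ctx, last2 pre⟩
        = (run' ++ rest).foldl bStep ⟨tables, page, num, true, tl ++ [x], ctx, last2 (pre ++ [x])⟩ := by
          rw [List.cons_append, List.foldl_cons, hstep]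
      _ = rest.foldl bStep ⟨tables, page, num, true, (tl ++ [x]) ++ run', ctx, last2 ((pre ++ [x]) ++ run')⟩ :=
          ih rest tables page num (tl ++ [x]) ctx (pre ++ [x]) (fun y hy => hx y (by simp [hy]))
      _ = rest.foldl bStep ⟨tables, page, num, true, tl ++ (x :: run'), ctx, last2 (pre ++ (x :: run'))⟩ := by
          simp

-- A's context slice is the last two already-processed lines
theorem ctx_slice (lines : List String) (i : Nat) (h : i ≤ lines.length) :
    PySem.List.slice lines (some (max 0 ((i : Int) - 2))) (some (i : Int))
      = last2 (lines.take i) := by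
  rcases Nat.lt_or_ge i 2 with h2 | h2
  · have hmax : max 0 ((i : Int) - 2) = 0 := max_eq_left (by omega)
    rw [hmax, show (0 : Int) = ((0 : Nat) : Int) from rfl, PySem.List.slice_natCast]
    simp only [List.drop_zero, Nat.sub_zero, last2, List.length_take]
    rw [show min i lines.length - 2 = 0 from by omega, List.drop_zero]
  · have hmax : max 0 ((i : Int) - 2) = ((i - 2 : Nat) : Int) := by omega
    rw [hmax, PySem.List.slice_natCast]
    simp only [last2, List.length_take]
    rw [show min i lines.length - 2 = i - 2 from by omega, List.drop_take,
      show i - (i - 2) = 2 from by omega]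

-- the head of dropWhile fails the predicate
theorem dropWhile_head_false {α : Type} (p : α → Bool) (l : List α) (y : α) (ys : List α)
    (h : l.dropWhile p = y :: ys) : p y = false := by
  induction l with
  | nil => simp at h
  | cons a t ih =>
    rw [List.dropWhile_cons] at h
    split at h
    · exact ih h
    · cases h
      simp_all

-- ending a table on line m and then reprocessing m = B's one combined step
theorem bStep_end (st : BState) (m : String)
    (hb : (PySem.Str.strip m == "") = false) (hm : PySem.Str.startswith m "|" = false)
    (hin : st.inTable = true) :
    bStep st m = bStep (bFlush st) m := by
  have hb' := hb
  have hm' := hm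
  simp at hb' hm'
  simp [bStep, bFlush, hb', hm', hin]

-- main invariant: A's indexed loop from i = pre.length equals B's fold over the rest
theorem main_inv (lines : List String)
    (hnb : ∀ l ∈ lines, (PySem.Str.strip l == "") = false) :
    ∀ (n : Nat) (pre rest : List String) (tables : List (String × String × Int))
      (page num : Int) (tl ctx : List String),
      rest.length = n → lines = pre ++ rest →
      ectMain lines tables page num pre.length =
        (let fin := rest.foldl bStep ⟨tables, page, num, false, tl, ctx, last2 pre⟩
         (if fin.inTable then bFlush fin else fin).tables) := by
  intro n
  induction n using Nat.strong_induction_on with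
  | _ n ih =>
    intro pre rest tables page num tl ctx hlen hsplit
    cases rest with
    | nil =>
      rw [ectMain, dif_neg (by rw [hsplit]; simp)]
      simp
    | cons l rest' =>
      have hlen' : rest'.length + 1 = n := by simpa using hlen
      have hmem : l ∈ lines := by rw [hsplit]; simp
      have hlt : pre.length < lines.length := by
        rw [hsplit]
        simp only [List.length_append, List.length_cons]
        omega
      have hgd : lines.getD pre.length "" = l := by
        have hget? : lines[pre.length]? = some l := by
          rw [hsplit, List.getElem?_append_right (Nat.le_refl _)]
          simp
        simp [List.getD_eq_getElem?_getD, hget?]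
      have hbl : (PySem.Str.strip l == "") = false := hnb l hmem
      have hbl' := hbl
      simp at hbl'
      rw [ectMain, dif_pos hlt, hgd]
      by_cases hpb : PySem.Str.isIn "<!-- page break -->" l = true
      · rw [if_pos hpb]
        have hpb' := hpb
        simp at hpb'
        have hstep : bStep ⟨tables, page, num, false, tl, ctx, last2 pre⟩ l
            = ⟨tables, page + 1, num, false, tl, ctx, last2 (pre ++ [l])⟩ := by
          simp [bStep, hbl', hpb', slice_neg_two, last2_snoc]
        have hIH := ih rest'.length (by omega) (pre ++ [l]) rest' tables (page + 1) num tl ctx rfl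
          (by rw [hsplit]; simp)
        simp only [List.length_append, List.length_cons, List.length_nil] at hIH
        simp only [List.foldl_cons, hstep]
        exact hIH
      · rw [if_neg hpb]
        rw [Bool.not_eq_true] at hpb
        have hpb' := hpb
        simp at hpb'
        by_cases hcond : (PySem.Str.startswith l "|" && decide (1 < PySem.Str.count l "|")) = true
        · rw [dif_pos hcond]
          have hc := hcond
          rw [Bool.and_eq_true] at hc
          obtain ⟨hc1, hc2⟩ := hc
          have hsw : swP l = true := hc1
          have hc1' := hc1
          have hc2' := hc2
          simp at hc1' hc2'
          have hdropl : lines.drop pre.length = l :: rest' := by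
            rw [hsplit, List.drop_left]
          obtain ⟨run, hrun⟩ : ∃ r, rest'.takeWhile swP = r := ⟨_, rfl⟩
          obtain ⟨rest₂, hrest₂⟩ : ∃ r, rest'.dropWhile swP = r := ⟨_, rfl⟩
          have hsplit' : rest' = run ++ rest₂ := by
            rw [← hrun, ← hrest₂, List.takeWhile_append_dropWhile]
          have htw : (l :: rest').takeWhile swP = l :: run := by
            rw [List.takeWhile_cons, if_pos hsw, hrun]
          have hrunmem : ∀ x ∈ run, swP x = true ∧ (PySem.Str.strip x == "") = false := by
            intro x hx
            rw [← hrun] at hx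
            refine ⟨List.mem_takeWhile_imp hx, hnb x ?_⟩
            rw [hsplit]
            have hx' : x ∈ rest' := List.Sublist.mem hx (List.takeWhile_sublist _)
            simp [hx']
          have hctx : PySem.List.slice lines (some (max 0 ((pre.length : Int) - 2)))
              (some ((pre.length : Int))) = last2 pre := by
            rw [ctx_slice lines pre.length (by omega)]
            congr 1
            rw [hsplit, List.take_left]
          have hect : extract_context_and_table lines pre.length
              = (PySem.Str.join "\n" (last2 pre) ++ "\n\n" ++ PySem.Str.join "\n" (l :: run),
                 pre.length + (run.length + 1)) := by
            have h1 := ectInner_spec (l :: rest') lines pre.length [] hdropl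
            rw [htw] at h1
            simp only [extract_context_and_table, h1, hctx, List.nil_append, List.length_cons]
          have hcontent : (extract_context_and_table lines pre.length).1
              = PySem.Str.join "\n" (last2 pre) ++ "\n\n" ++ PySem.Str.join "\n" (l :: run) := by
            rw [hect]
          have hnext : (extract_context_and_table lines pre.length).2
              = pre.length + (run.length + 1) := by
            rw [hect]
          have hstep1 : bStep ⟨tables, page, num, false, tl, ctx, last2 pre⟩ l
              = ⟨tables, page, num, true, [l], last2 pre, last2 (pre ++ [l])⟩ := by
            simp [bStep, hbl', hpb', hc1', hc2', slice_neg_two, last2_snoc]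
          have hfold : (l :: rest').foldl bStep ⟨tables, page, num, false, tl, ctx, last2 pre⟩
              = rest₂.foldl bStep ⟨tables, page, num, true, [l] ++ run, last2 pre, last2 ((pre ++ [l]) ++ run)⟩ := by
            rw [List.foldl_cons, hstep1]
            conv_lhs => rw [hsplit']
            exact fold_run run rest₂ tables page num [l] (last2 pre) (pre ++ [l]) hrunmem
          rw [hcontent, hnext]
          cases hcase : rest₂ with
          | nil =>
            have hlines2 : lines = pre ++ l :: run := by
              rw [hsplit, hsplit', hcase]
              simp
            rw [ectMain, dif_neg (by rw [hlines2]; simp only [List.length_append, List.length_cons]; omega)]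
            simp only [hfold, hcase, List.foldl_nil]
            simp [bFlush]
          | cons m rest₃ =>
            have hmmem : m ∈ lines := by
              rw [hsplit]
              have hm2 : m ∈ rest' := by
                refine List.Sublist.mem ?_ (List.dropWhile_sublist swP)
                rw [hrest₂, hcase]
                simp
              simp [hm2]
            have hmb : (PySem.Str.strip m == "") = false := hnb m hmmem
            have hmsw : PySem.Str.startswith m "|" = false := by
              have := dropWhile_head_false swP rest' m rest₃ (by rw [hrest₂, hcase])
              exact this
            have hlines3 : lines = (pre ++ l :: run) ++ m :: rest₃ := by
              rw [hsplit, hsplit', hcase]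
              simp
            have hlen3 : rest₃.length + 1 < n := by
              have hr : rest'.length = run.length + (rest₃.length + 1) := by
                rw [hsplit', hcase]
                simp
              omega
            have hIH := ih (rest₃.length + 1) hlen3 (pre ++ l :: run) (m :: rest₃)
              (tables ++ [(PySem.Str.join "\n" (last2 pre) ++ "\n\n" ++ PySem.Str.join "\n" (l :: run),
                "table_" ++ PySem.Int.toStr num, page)])
              page (num + 1) ([l] ++ run) (last2 pre) rfl hlines3
            simp only [List.length_append, List.length_cons] at hIH
            rw [hIH]
            simp only [hfold, hcase, List.foldl_cons]
            rw [bStep_end ⟨tables, page, num, true, [l] ++ run, last2 pre, last2 ((pre ++ [l]) ++ run)⟩ m hmb hmsw rfl]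
            have hflush : bFlush ⟨tables, page, num, true, [l] ++ run, last2 pre, last2 ((pre ++ [l]) ++ run)⟩
                = ⟨tables ++ [(PySem.Str.join "\n" (last2 pre) ++ "\n\n" ++ PySem.Str.join "\n" ([l] ++ run),
                    "table_" ++ PySem.Int.toStr num, page)],
                   page, num + 1, false, [l] ++ run, last2 pre, last2 ((pre ++ [l]) ++ run)⟩ := rfl
            rw [hflush]
            have heq : (pre ++ [l]) ++ run = pre ++ l :: run := by simp
            rw [heq]
            rfl
        · rw [dif_neg hcond]
          have hstep : bStep ⟨tables, page, num, false, tl, ctx, last2 pre⟩ l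
              = ⟨tables, page, num, false, tl, ctx, last2 (pre ++ [l])⟩ := by
            by_cases hA : PySem.Str.startswith l "|" = true
            · have hB : ¬(1 < PySem.Str.count l "|") := by
                intro hb
                exact hcond (by rw [hA]; simpa using hb)
              have hA' := hA
              simp at hA'
              have hB' := hB
              simp at hB'
              have hB'' : ¬(1 < PySem.Chars.count l.toList ['|']) := by omega
              simp [bStep, hbl', hpb', hA', hB'', slice_neg_two, last2_snoc]
            · rw [Bool.not_eq_true] at hA
              have hA' := hA
              simp at hA'
              simp [bStep, hbl', hpb', hA', slice_neg_two, last2_snoc]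
          have hIH := ih rest'.length (by omega) (pre ++ [l]) rest' tables page num tl ctx rfl
            (by rw [hsplit]; simp)
          simp only [List.length_append, List.length_cons, List.length_nil] at hIH
          simp only [List.foldl_cons, hstep]
          exact hIH

-- ===== VERDICT (by name: the statement is the Claim_ definition above) =====
theorem extract_tables_with_content_spec : Claim_equal_extract_tables_with_content := by
  intro md _
  unfold Spec_extract_tables_with_content extract_tables_with_content extract_tables_with_content_alt
  rw [foldl_bStep_filter]
  have hnb : ∀ l ∈ ((PySem.Str.split? md "\n").getD []).filter (fun x => !(PySem.Str.strip x == "")),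
      (PySem.Str.strip l == "") = false := by
    intro l hl
    have := (List.mem_filter.mp hl).2
    simpa using this
  have hmain := main_inv _ hnb
    (((PySem.Str.split? md "\n").getD []).filter (fun x => !(PySem.Str.strip x == ""))).length
    [] (((PySem.Str.split? md "\n").getD []).filter (fun x => !(PySem.Str.strip x == "")))
    [] 1 1 [] [] rfl rfl
  simpa [last2] using hmain
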